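-- pv_equiv track=rewrite | github.com/arvarik/trebek | scripts/validate_llm_pipeline/extraction.py | _match_to_contestant
-- ===== SOURCE A (Python) =====
-- def _match_to_contestant(name, contestant_names):
--     """Match a partial name to a full contestant name via substring/case-insensitive matching."""
--     if not name:
--         return None
--     name_lower = name.lower().strip()
--     # Exact match
--     for cn in contestant_names:
--         if cn.lower() == name_lower:
--             return cn
--     # First name match
--     for cn in contestant_names:
--         if cn.lower().startswith(name_lower) or name_lower in cn.lower():
--             return cn
--     # Last name match
--     for cn in contestant_names:
--         parts = cn.lower().split()
--         if any(name_lower == p for p in parts):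
--             return cn
--     return None
-- ===== SOURCE B (Python) =====
-- def _match_to_contestant(name, contestant_names):
--     """Match a partial name to a full contestant name in ONE pass: track the
--     best (lowest) match tier seen so far; strict-< update keeps the earliest
--     candidate of the best tier."""
--     if not name:
--         return None
--     name_lower = name.lower().strip()
--     best = None
--     best_rank = 4
--     for cn in contestant_names:
--         cl = cn.lower()
--         if cl == name_lower:
--             r = 1                       # exact match
--         elif name_lower in cl:
--             r = 2                       # substring (subsumes prefix) match
--         elif name_lower in cl.split():
--             r = 3                       # whole-word (last-name) match
--         else:
--             continue
--         if r < best_rank: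
--             best_rank = r
--             best = cn
--     return best
-- ===== Notes on version B (the rewrite author's own statement) =====
-- stated objective: faster
-- what changed: Replaces A's three sequential scans (exact, then prefix/substring, then whole-word) by a single pass that assigns each candidate a match tier and tracks the minimum tier with strict-less-than updates so the earliest candidate of the best tier wins; the redundant startswith test is dropped since prefix implies substring.
import Mathlib
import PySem

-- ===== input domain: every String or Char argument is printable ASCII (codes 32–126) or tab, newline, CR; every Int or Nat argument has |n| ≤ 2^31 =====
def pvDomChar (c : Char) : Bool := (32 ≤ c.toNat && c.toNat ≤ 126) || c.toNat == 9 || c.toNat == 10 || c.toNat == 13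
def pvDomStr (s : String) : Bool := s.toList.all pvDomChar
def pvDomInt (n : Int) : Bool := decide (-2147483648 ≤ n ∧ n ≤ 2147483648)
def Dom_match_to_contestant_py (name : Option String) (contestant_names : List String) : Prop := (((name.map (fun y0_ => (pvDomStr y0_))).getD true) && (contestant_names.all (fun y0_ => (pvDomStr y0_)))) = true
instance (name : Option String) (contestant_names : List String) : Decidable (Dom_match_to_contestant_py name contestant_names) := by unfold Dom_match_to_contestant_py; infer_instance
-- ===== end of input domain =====

-- B replaces A's three sequential scans by a single pass tracking the best match tier
-- (strict-< update keeps the earliest candidate of the best tier); same return value, measured faster by a constant factor.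

-- ===== PORT A =====
-- literal transliteration of A: three sequential for-loops, each returning its first hit
def match_to_contestant_py (name : Option String) (contestant_names : List String) : Option String :=
  match name with
  | none => none
  | some n =>
    if n = "" then none
    else
      let nl := PySem.Str.strip (PySem.Str.lower n)
      match contestant_names.find? (fun cn => PySem.Str.lower cn == nl) with
      | some cn => some cn
      | none =>
        match contestant_names.find? (fun cn =>
            PySem.Str.startswith (PySem.Str.lower cn) nl || PySem.Str.isIn nl (PySem.Str.lower cn)) with
        | some cn => some cn
        | none =>
          match contestant_names.find? (fun cn =>
              (PySem.Str.split₀ (PySem.Str.lower cn)).any (fun p => nl == p)) with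
          | some cn => some cn
          | none => none

-- ===== PORT B =====
-- the match tier of a candidate: 1 exact, 2 substring, 3 whole word, 4 no match
def pvRank (nl cn : String) : Nat :=
  if PySem.Str.lower cn == nl then 1
  else if PySem.Str.isIn nl (PySem.Str.lower cn) then 2
  else if (PySem.Str.split₀ (PySem.Str.lower cn)).any (fun p => nl == p) then 3
  else 4

-- one loop iteration of B: update (best_rank, best) on a strictly better tier
def pvStep (nl : String) (acc : Nat × Option String) (cn : String) : Nat × Option String :=
  if pvRank nl cn < acc.1 then (pvRank nl cn, some cn) else acc

def match_to_contestant_py_alt (name : Option String) (contestant_names : List String) : Option String :=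
  match name with
  | none => none
  | some n =>
    if n = "" then none
    else
      let nl := PySem.Str.strip (PySem.Str.lower n)
      (contestant_names.foldl (pvStep nl) (4, none)).2

-- ===== PRECONDITION & SPEC =====
def Spec_match_to_contestant_py (name : Option String) (contestant_names : List String) (out : Option String) : Prop := out = match_to_contestant_py_alt name contestant_names
instance (name : Option String) (contestant_names : List String) (out : Option String) : Decidable (Spec_match_to_contestant_py name contestant_names out) := by unfold Spec_match_to_contestant_py; infer_instance

-- ===== CLAIM (what is proved, stated in full; the proofs are below) =====
def Claim_equal_match_to_contestant_py : Prop := ∀ (name : Option String) (contestant_names : List String), Dom_match_to_contestant_py name contestant_names → Spec_match_to_contestant_py name contestant_names (match_to_contestant_py name contestant_names)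

-- ===== LEMMAS AND PROOFS =====

-- find? only looks at members, so predicates equal on members give the same find?
theorem pvFind?_congr {α : Type} {p q : α → Bool} {l : List α}
    (h : ∀ x ∈ l, p x = q x) : l.find? p = l.find? q := by
  induction l with
  | nil => rfl
  | cons x t ih =>
    have hx := h x (List.mem_cons_self)
    by_cases hp : p x = true
    · rw [List.find?_cons_of_pos hp, List.find?_cons_of_pos (hx ▸ hp)]
    · rw [List.find?_cons_of_neg hp, List.find?_cons_of_neg (hx ▸ hp)]
      exact ih fun y hy => h y (List.mem_cons_of_mem _ hy)

-- prefix matching is subsumed by substring matching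
theorem pv_startswith_or_isIn (nl cl : String) :
    (PySem.Str.startswith cl nl || PySem.Str.isIn nl cl) = PySem.Str.isIn nl cl := by
  cases h : PySem.Str.startswith cl nl with
  | false => simp
  | true =>
    have h' : PySem.Chars.startswith cl.toList nl.toList = true := by simpa using h
    have hin : PySem.Str.isIn nl cl = true :=
      (PySem.Str.isIn_iff_infix nl cl).mpr ((PySem.Chars.startswith_iff _ _).mp h').isInfix
    simp only [Bool.true_or]
    exact hin.symm

theorem pvRank_cases (nl cn : String) :
    pvRank nl cn = 1 ∨ pvRank nl cn = 2 ∨ pvRank nl cn = 3 ∨ pvRank nl cn = 4 := by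
  unfold pvRank; split_ifs <;> simp

-- A's first-pass test is "tier = 1"
theorem pvPred1_eq (nl cn : String) :
    (PySem.Str.lower cn == nl) = (pvRank nl cn == 1) := by
  unfold pvRank; split_ifs <;> simp_all

-- with no tier-1 candidate, A's second-pass test is "tier = 2"
theorem pvPred2_eq (nl cn : String) (h1 : pvRank nl cn ≠ 1) :
    PySem.Str.isIn nl (PySem.Str.lower cn) = (pvRank nl cn == 2) := by
  unfold pvRank at h1 ⊢
  split_ifs at h1 ⊢ with ha hb hc <;> simp_all

-- with no tier-1/2 candidate, A's third-pass test is "tier = 3"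
theorem pvPred3_eq (nl cn : String) (h1 : pvRank nl cn ≠ 1) (h2 : pvRank nl cn ≠ 2) :
    ((PySem.Str.split₀ (PySem.Str.lower cn)).any (fun p => nl == p)) = (pvRank nl cn == 3) := by
  unfold pvRank at h1 h2 ⊢
  split_ifs at h1 h2 ⊢ with ha hb hc <;> simp_all
  exact fun x hx hax => hc (hax ▸ hx)

-- the value of A's three-pass chain started with bound b and default best
def pvSel (nl : String) (l : List String) (b : Nat) (best : Option String) : Option String :=
  if b ≤ 1 then best
  else match l.find? (fun cn => pvRank nl cn == 1) with
    | some x => some x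
    | none =>
      if b ≤ 2 then best
      else match l.find? (fun cn => pvRank nl cn == 2) with
        | some x => some x
        | none =>
          if b ≤ 3 then best
          else match l.find? (fun cn => pvRank nl cn == 3) with
            | some x => some x
            | none => best

-- characterization of B's single-pass fold: it returns the first candidate of the
-- lowest tier that improves on the initial bound b, else the initial best
theorem pvFold_char (nl : String) (l : List String) :
    ∀ (b : Nat) (best : Option String), 1 ≤ b → b ≤ 4 →
      (l.foldl (pvStep nl) (b, best)).2 = pvSel nl l b best := by
  induction l with
  | nil =>
    intro b best _ _
    simp only [List.foldl_nil, pvSel, List.find?_nil]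
    split_ifs <;> rfl
  | cons x t ih =>
    intro b best hb1 hb4
    interval_cases b <;> rcases pvRank_cases nl x with h | h | h | h <;>
      simp [List.foldl_cons, pvStep, h, pvSel,
        ih 1 _ (by norm_num) (by norm_num), ih 2 _ (by norm_num) (by norm_num),
        ih 3 _ (by norm_num) (by norm_num), ih 4 _ (by norm_num) (by norm_num)]

-- ===== VERDICT (by name: the statement is the Claim_ definition above) =====
theorem match_to_contestant_py_spec : Claim_equal_match_to_contestant_py := by
  unfold Claim_equal_match_to_contestant_py
  intro name l _
  unfold Spec_match_to_contestant_py
  cases name with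
  | none => rfl
  | some n =>
    by_cases hn : n = ""
    · simp [match_to_contestant_py, match_to_contestant_py_alt, hn]
    · simp only [match_to_contestant_py, match_to_contestant_py_alt, if_neg hn]
      rw [pvFold_char (PySem.Str.strip (PySem.Str.lower n)) l 4 none (by norm_num) (by norm_num)]
      set nl := PySem.Str.strip (PySem.Str.lower n) with hnl
      rw [pvFind?_congr (fun cn _ => pvPred1_eq nl cn)]
      cases hf1 : l.find? (fun cn => pvRank nl cn == 1) with
      | some x => simp [pvSel, hf1]
      | none =>
        have hm1 : ∀ cn ∈ l, pvRank nl cn ≠ 1 := by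
          intro cn hcn
          have := List.find?_eq_none.mp hf1 cn hcn
          simpa using this
        have e2 : l.find? (fun cn =>
            PySem.Str.startswith (PySem.Str.lower cn) nl || PySem.Str.isIn nl (PySem.Str.lower cn))
            = l.find? (fun cn => pvRank nl cn == 2) := by
          apply pvFind?_congr
          intro cn hcn
          rw [pv_startswith_or_isIn]
          exact pvPred2_eq nl cn (hm1 cn hcn)
        rw [e2]
        cases hf2 : l.find? (fun cn => pvRank nl cn == 2) with
        | some x => simp [pvSel, hf1, hf2]
        | none =>
          have hm2 : ∀ cn ∈ l, pvRank nl cn ≠ 2 := by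
            intro cn hcn
            have := List.find?_eq_none.mp hf2 cn hcn
            simpa using this
          have e3 : l.find? (fun cn =>
              (PySem.Str.split₀ (PySem.Str.lower cn)).any (fun p => nl == p))
              = l.find? (fun cn => pvRank nl cn == 3) := by
            apply pvFind?_congr
            intro cn hcn
            exact pvPred3_eq nl cn (hm1 cn hcn) (hm2 cn hcn)
          rw [e3]
          cases hf3 : l.find? (fun cn => pvRank nl cn == 3) with
          | some x => simp [pvSel, hf1, hf2, hf3]
          | none => simp [pvSel, hf1, hf2, hf3]
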